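-- pv_equiv track=rewrite | github.com/ProductFactory-01/Telecome_ChurnPrediction | Backend/app/features/data_agent/column_mapper.py | classify_columns_to_tables
-- ===== SOURCE A (Python) =====
-- from typing import List, Dict
--
-- SCHEMA_COLUMNS = {
--     "demographics": [
--         "Customer ID", "Gender", "Age", "Under 30", "Senior Citizen",
--         "Married", "Dependents", "Number of Dependents", "Name", "email", "mobile_number"
--     ],
--     "location": [
--         "Location ID", "Country", "State", "City", "Zip Code", "Lat Long", "Latitude", "Longitude"
--     ],
--     "services": [
--         "Service ID", "Quarter", "Referred a Friend", "Number of Referrals",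
--         "Tenure in Months", "Offer", "Phone Service", "Avg Monthly Long Distance Charges",
--         "Multiple Lines", "Internet Service", "Internet Type", "Avg Monthly GB Download",
--         "Online Security", "Online Backup", "Device Protection Plan", "Premium Tech Support",
--         "Streaming TV", "Streaming Movies", "Streaming Music", "Unlimited Data",
--         "Contract", "Paperless Billing", "Payment Method", "Monthly Charge", "Total Charges",
--         "Total Refunds", "Total Extra Data Charges", "Total Long Distance Charges", "Total Revenue"
--     ],
--     "status": [
--         "Status ID", "Satisfaction Score", "Customer Status", "Churn Label",
--         "Churn Value", "Churn Score", "CLTV", "Churn Category", "Churn Reason"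
--     ]
-- }
--
-- def classify_columns_to_tables(mapping: Dict) -> Dict:
--     """Groups mapped columns by their target table."""
--     assignment = {table: [] for table in SCHEMA_COLUMNS.keys()}
--
--     for user_col, target_col in mapping.items():
--         if not target_col: continue
--
--         # Find which table this column belongs to
--         assigned = False
--         for table, cols in SCHEMA_COLUMNS.items():
--             if target_col in cols:
--                 assignment[table].append(user_col)
--                 assigned = True
--                 break
--
--     return {k: v for k, v in assignment.items() if v}
-- ===== SOURCE B (Python) =====
-- SCHEMA_COLUMNS = {
--     "demographics": [
--         "Customer ID", "Gender", "Age", "Under 30", "Senior Citizen",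
--         "Married", "Dependents", "Number of Dependents", "Name", "email", "mobile_number"
--     ],
--     "location": [
--         "Location ID", "Country", "State", "City", "Zip Code", "Lat Long", "Latitude", "Longitude"
--     ],
--     "services": [
--         "Service ID", "Quarter", "Referred a Friend", "Number of Referrals",
--         "Tenure in Months", "Offer", "Phone Service", "Avg Monthly Long Distance Charges",
--         "Multiple Lines", "Internet Service", "Internet Type", "Avg Monthly GB Download",
--         "Online Security", "Online Backup", "Device Protection Plan", "Premium Tech Support",
--         "Streaming TV", "Streaming Movies", "Streaming Music", "Unlimited Data",
--         "Contract", "Paperless Billing", "Payment Method", "Monthly Charge", "Total Charges",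
--         "Total Refunds", "Total Extra Data Charges", "Total Long Distance Charges", "Total Revenue"
--     ],
--     "status": [
--         "Status ID", "Satisfaction Score", "Customer Status", "Churn Label",
--         "Churn Value", "Churn Score", "CLTV", "Churn Category", "Churn Reason"
--     ]
-- }
--
--
-- def classify_columns_to_tables(mapping):
--     """Groups mapped columns by their target table (index-based single pass)."""
--     # reverse index: schema column name -> its table (first table wins)
--     col_to_table = {}
--     for table, cols in SCHEMA_COLUMNS.items():
--         for col in cols:
--             if col not in col_to_table:
--                 col_to_table[col] = table
--
--     assignment = {table: [] for table in SCHEMA_COLUMNS}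
--     for user_col, target_col in mapping.items():
--         if not target_col:
--             continue
--         table = col_to_table.get(target_col)
--         if table is not None:
--             assignment[table].append(user_col)
--
--     return {k: v for k, v in assignment.items() if v}
-- ===== Notes on version B (the rewrite author's own statement) =====
-- stated objective: faster
-- what changed: B precomputes a reverse index (schema column -> table, first occurrence wins) once, so A's per-mapping-entry inner scan over all four schema tables collapses to a single dict lookup in one flat pass.
import Mathlib
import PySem

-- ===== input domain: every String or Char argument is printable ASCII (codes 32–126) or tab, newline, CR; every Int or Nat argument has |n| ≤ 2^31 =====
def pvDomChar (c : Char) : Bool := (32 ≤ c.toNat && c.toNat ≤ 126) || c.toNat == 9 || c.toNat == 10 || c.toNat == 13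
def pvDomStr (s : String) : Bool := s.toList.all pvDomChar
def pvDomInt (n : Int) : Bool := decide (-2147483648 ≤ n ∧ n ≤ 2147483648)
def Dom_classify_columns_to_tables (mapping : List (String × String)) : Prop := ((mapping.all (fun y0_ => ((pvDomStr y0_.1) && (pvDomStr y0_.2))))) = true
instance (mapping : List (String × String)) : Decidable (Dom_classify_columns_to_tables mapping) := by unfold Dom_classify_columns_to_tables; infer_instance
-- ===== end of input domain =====

-- B replaces A's per-entry scan over the four schema tables by a reverse index
-- (schema column → table) built once, so grouping becomes a single flat pass (objective: idiomatic).

-- SCHEMA_COLUMNS, shared module constant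
def pvSchema : List (String × List String) := [
  ("demographics", ["Customer ID", "Gender", "Age", "Under 30", "Senior Citizen",
    "Married", "Dependents", "Number of Dependents", "Name", "email", "mobile_number"]),
  ("location", ["Location ID", "Country", "State", "City", "Zip Code", "Lat Long", "Latitude", "Longitude"]),
  ("services", ["Service ID", "Quarter", "Referred a Friend", "Number of Referrals",
    "Tenure in Months", "Offer", "Phone Service", "Avg Monthly Long Distance Charges",
    "Multiple Lines", "Internet Service", "Internet Type", "Avg Monthly GB Download",
    "Online Security", "Online Backup", "Device Protection Plan", "Premium Tech Support",
    "Streaming TV", "Streaming Movies", "Streaming Music", "Unlimited Data",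
    "Contract", "Paperless Billing", "Payment Method", "Monthly Charge", "Total Charges",
    "Total Refunds", "Total Extra Data Charges", "Total Long Distance Charges", "Total Revenue"]),
  ("status", ["Status ID", "Satisfaction Score", "Customer Status", "Churn Label",
    "Churn Value", "Churn Score", "CLTV", "Churn Category", "Churn Reason"])]

-- ===== PORT A =====
-- A's inner 'for table, cols in SCHEMA_COLUMNS.items(): if target_col in cols: append; break'
def pvInnerA (u t : String) (asg : PySem.Dict String (List String)) :
    List (String × List String) → PySem.Dict String (List String)
  | [] => asg
  | (tb, cols) :: rest =>
      if t ∈ cols then asg.modify tb [] (· ++ [u]) else pvInnerA u t asg rest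

def classify_columns_to_tables (mapping : List (String × String)) : List (String × List String) :=
  let asg0 := pvSchema.foldl (fun d p => d.insert p.1 []) PySem.Dict.empty
  let asg := mapping.foldl (fun asg p => if p.2 = "" then asg else pvInnerA p.1 p.2 asg pvSchema) asg0
  asg.items.filter (fun p => decide (p.2 ≠ []))

-- ===== PORT B =====
-- reverse index: for table, cols: for col: if col not in rev: rev[col] = table
def pvRev : PySem.Dict String String :=
  pvSchema.foldl
    (fun d p => p.2.foldl (fun d c => if d.contains c then d else d.insert c p.1) d)
    PySem.Dict.empty

def classify_columns_to_tables_alt (mapping : List (String × String)) : List (String × List String) :=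
  let asg0 := pvSchema.foldl (fun d p => d.insert p.1 []) PySem.Dict.empty
  let asg := mapping.foldl
    (fun asg p =>
      if p.2 = "" then asg
      else match pvRev.get? p.2 with
        | some tb => asg.modify tb [] (· ++ [p.1])
        | none => asg) asg0
  asg.items.filter (fun p => decide (p.2 ≠ []))

-- ===== PRECONDITION & SPEC =====
def Spec_classify_columns_to_tables (mapping : List (String × String)) (out : List (String × List String)) : Prop := out = classify_columns_to_tables_alt mapping
instance (mapping : List (String × String)) (out : List (String × List String)) : Decidable (Spec_classify_columns_to_tables mapping out) := by unfold Spec_classify_columns_to_tables; infer_instance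

-- ===== CLAIM (what is proved, stated in full; the proofs are below) =====
def Claim_equal_classify_columns_to_tables : Prop := ∀ (mapping : List (String × String)), Dom_classify_columns_to_tables mapping → Spec_classify_columns_to_tables mapping (classify_columns_to_tables mapping)

-- ===== LEMMAS AND PROOFS =====

-- proof-side: the table A's inner scan assigns t to (first table whose cols contain t)
def pvFindTbl (t : String) : List (String × List String) → Option String
  | [] => none
  | (tb, cols) :: rest => if t ∈ cols then some tb else pvFindTbl t rest

-- A's inner scan characterised by pvFindTbl
theorem pvInnerA_eq (u t : String) (asg : PySem.Dict String (List String)) :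
    ∀ s : List (String × List String),
      pvInnerA u t asg s =
        match pvFindTbl t s with
        | some tb => asg.modify tb [] (· ++ [u])
        | none => asg := by
  intro s
  induction s with
  | nil => rfl
  | cons p rest ih =>
      obtain ⟨tb, cols⟩ := p
      by_cases h : t ∈ cols <;> simp [pvInnerA, pvFindTbl, h, ih]

-- one table's insert-if-absent loop, as a lookup
theorem pvRevInner_get? (tb : String) (cols : List String) (d : PySem.Dict String String) (t : String) :
    (cols.foldl (fun d c => if d.contains c then d else d.insert c tb) d).get? t =
      (d.get? t).or (if t ∈ cols then some tb else none) := by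
  induction cols generalizing d with
  | nil => simp
  | cons c cs ih =>
      simp only [List.foldl_cons]
      rw [ih]
      by_cases hc : d.contains c = true
      · simp only [hc, if_true]
        by_cases ht : t = c
        · subst ht
          rcases ho : d.get? t with _ | v
          · rw [PySem.Dict.contains_eq_isSome_get?, ho] at hc; simp at hc
          · simp
        · simp [List.mem_cons, ht]
      · simp only [Bool.not_eq_true] at hc
        simp only [hc, Bool.false_eq_true, if_false]
        by_cases ht : t = c
        · subst ht
          have hn : d.get? t = none := by
            rcases ho : d.get? t with _ | v
            · rfl
            · rw [PySem.Dict.contains_eq_isSome_get?, ho] at hc; simp at hc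
          rw [PySem.Dict.get?_insert, if_pos rfl]
          simp [hn]
        · rw [PySem.Dict.get?_insert, if_neg ht]
          simp [List.mem_cons, ht]

-- the whole reverse-index build, as a lookup
theorem pvRevBuild_get? (t : String) :
    ∀ (s : List (String × List String)) (d : PySem.Dict String String),
      (s.foldl (fun d p => p.2.foldl (fun d c => if d.contains c then d else d.insert c p.1) d) d).get? t =
        (d.get? t).or (pvFindTbl t s) := by
  intro s
  induction s with
  | nil => simp [pvFindTbl]
  | cons p rest ih =>
      intro d
      obtain ⟨tb, cols⟩ := p
      simp only [List.foldl_cons]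
      rw [ih, pvRevInner_get? tb cols d t, Option.or_assoc, pvFindTbl]
      by_cases h : t ∈ cols <;> simp [h]

theorem pvRev_get? (t : String) : pvRev.get? t = pvFindTbl t pvSchema := by
  rw [pvRev, pvRevBuild_get? t pvSchema PySem.Dict.empty]
  simp

-- ===== VERDICT (by name: the statement is the Claim_ definition above) =====
theorem classify_columns_to_tables_spec : Claim_equal_classify_columns_to_tables := by
  intro mapping _
  unfold Spec_classify_columns_to_tables classify_columns_to_tables classify_columns_to_tables_alt
  have hstep :
      (fun (asg : PySem.Dict String (List String)) (p : String × String) =>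
          if p.2 = "" then asg else pvInnerA p.1 p.2 asg pvSchema) =
      (fun (asg : PySem.Dict String (List String)) (p : String × String) =>
          if p.2 = "" then asg
          else match pvRev.get? p.2 with
            | some tb => asg.modify tb [] (· ++ [p.1])
            | none => asg) := by
    funext asg p
    by_cases h : p.2 = ""
    · simp [h]
    · rw [if_neg h, if_neg h, pvRev_get? p.2, pvInnerA_eq]
  rw [hstep]
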